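-- pv_equiv track=rewrite | github.com/weipanchang/pythontdd | friendly_number.py | unfriend_number
-- ===== SOURCE A (Python) =====
-- def unfriend_number(a, b):
--     n = 0
--     for j in b:
--         isDivided = False
--         for i in a:
--             if i % j ==0:
--                 isDivided = True
--                 break
--         if not isDivided:
--             n += 1
--
--     return n
-- ===== SOURCE B (Python) =====
-- def unfriend_number(a, b):
--     # Count occurrences of each distinct value of b once, then test divisibility
--     # once per distinct value and sum the multiplicities of the unfriendly ones.
--     counts = {}
--     for j in b:
--         counts[j] = counts.get(j, 0) + 1
--     total = 0
--     for j, c in counts.items():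
--         if all(i % j != 0 for i in a):
--             total += c
--     return total
-- ===== Notes on version B (the rewrite author's own statement) =====
-- stated objective: alternative
-- what changed: Replaces A's per-element short-circuit scan over a with a frequency-dictionary pass over b followed by one divisibility test per DISTINCT b-value, summing multiplicities; Pre_ excludes only the inputs (a nonempty and 0 in b) on which both programs raise ZeroDivisionError.
import Mathlib
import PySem

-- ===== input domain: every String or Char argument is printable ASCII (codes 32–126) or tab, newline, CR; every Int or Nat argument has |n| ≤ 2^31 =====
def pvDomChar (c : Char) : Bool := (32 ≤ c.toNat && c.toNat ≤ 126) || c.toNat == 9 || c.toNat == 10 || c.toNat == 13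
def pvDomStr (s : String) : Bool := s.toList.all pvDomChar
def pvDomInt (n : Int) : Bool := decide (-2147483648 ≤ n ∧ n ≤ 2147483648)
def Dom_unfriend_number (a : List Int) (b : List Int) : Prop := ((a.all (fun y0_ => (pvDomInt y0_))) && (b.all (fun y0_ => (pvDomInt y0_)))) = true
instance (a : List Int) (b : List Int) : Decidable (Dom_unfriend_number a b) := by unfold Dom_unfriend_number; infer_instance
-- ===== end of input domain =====

-- B counts each distinct b-value once in a frequency dictionary and sums multiplicities
-- of the unfriendly ones, instead of A's per-element short-circuit scan (objective: alternative).

-- ===== PORT A =====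
-- A's inner 'for i in a: if i % j == 0: isDivided = True; break' loop
def pvAisDivided (a : List Int) (j : Int) : Bool :=
  match a with
  | [] => false
  | i :: rest => if PySem.Int.mod i j == 0 then true else pvAisDivided rest j

def unfriend_number (a : List Int) (b : List Int) : Int :=
  b.foldl (fun n j => if !(pvAisDivided a j) then n + 1 else n) 0

-- ===== PORT B =====
-- 'counts[j] = counts.get(j, 0) + 1' over b
def pvCounts (b : List Int) : PySem.Dict Int Int :=
  b.foldl (fun d j => d.insert j (d.getD j 0 + 1)) PySem.Dict.empty

def unfriend_number_alt (a : List Int) (b : List Int) : Int :=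
  (pvCounts b).items.foldl
    (fun total jc =>
      if a.all (fun i => !(PySem.Int.mod i jc.1 == 0)) then total + jc.2 else total) 0

-- ===== PRECONDITION & SPEC =====
-- Pre_ excludes exactly the inputs on which A raises ZeroDivisionError (a nonempty and 0 ∈ b);
-- B raises there too.
def Pre_unfriend_number (a : List Int) (b : List Int) : Prop := a = [] ∨ (0:Int) ∉ b
instance (a : List Int) (b : List Int) : Decidable (Pre_unfriend_number a b) := by unfold Pre_unfriend_number; infer_instance
def pvWitness_unfriend_number : List Int × List Int := ([6, 10], [2, 7, 7, 5])

def Spec_unfriend_number (a : List Int) (b : List Int) (out : Int) : Prop := out = unfriend_number_alt a b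
instance (a : List Int) (b : List Int) (out : Int) : Decidable (Spec_unfriend_number a b out) := by unfold Spec_unfriend_number; infer_instance

-- ===== CLAIM (what is proved, stated in full; the proofs are below) =====
def Claim_equal_unfriend_number : Prop := ∀ (a : List Int) (b : List Int), Dom_unfriend_number a b → Pre_unfriend_number a b → Spec_unfriend_number a b (unfriend_number a b)

-- ===== LEMMAS AND PROOFS =====

-- A's break-scan equals 'any'
theorem pvAisDivided_eq_any (a : List Int) (j : Int) :
    pvAisDivided a j = a.any (fun i => PySem.Int.mod i j == 0) := by
  induction a with
  | nil => simp [pvAisDivided]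
  | cons i rest ih =>
    simp only [pvAisDivided, List.any_cons, ih]
    split_ifs with h <;> simp [h]

-- the per-value predicates of the two ports agree
theorem pred_agree (a : List Int) (j : Int) :
    (a.all (fun i => !(PySem.Int.mod i j == 0))) = !(pvAisDivided a j) := by
  rw [pvAisDivided_eq_any, List.any_eq_not_all_not, Bool.not_not]

-- summing (count of l') over any Nodup list containing all elements of l' gives l'.length
theorem sum_count_of_nodup (s : List Int) (l' : List Int) (hnd : s.Nodup)
    (hsub : ∀ x ∈ l', x ∈ s) :
    (s.map (fun k => (l'.count k : Int))).sum = (l'.length : Int) := by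
  induction s generalizing l' with
  | nil =>
    cases l' with
    | nil => simp
    | cons x t => exact absurd (hsub x (by simp)) (by simp)
  | cons k s ih =>
    have hnd' := List.nodup_cons.mp hnd
    have key : ∀ x ∈ l'.filter (fun y => !(y == k)), x ∈ s := by
      intro x hx
      have hmem := List.of_mem_filter hx
      have hx' := List.mem_of_mem_filter hx
      rcases List.mem_cons.mp (hsub x hx') with h | h
      · rw [h] at hmem; simp at hmem
      · exact h
    have hih := ih (l'.filter (fun y => !(y == k))) hnd'.2 key
    have hmapeq : (s.map (fun x => ((l'.filter (fun y => !(y == k))).count x : Int))).sum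
        = (s.map (fun x => (l'.count x : Int))).sum := by
      apply congrArg
      apply List.map_congr_left
      intro x hx
      have hne : x ≠ k := by rintro rfl; exact hnd'.1 hx
      rw [List.count_filter (by simp [hne])]
    have hsplit : l'.count k + (l'.filter (fun y => !(y == k))).length = l'.length := by
      have h := List.length_eq_countP_add_countP (p := fun y => (y == k)) (l := l')
      have hfe : l'.filter (fun a => decide ¬((a == k) = true)) = l'.filter (fun y => !(y == k)) := by
        apply List.filter_congr; intro x _; by_cases hxk : x = k <;> simp [hxk]
      simp only [List.count_eq_countP, List.countP_eq_length_filter, hfe] at h ⊢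
      omega
    rw [hmapeq] at hih
    simp only [List.map_cons, List.sum_cons, hih]
    omega

theorem countP_eq_sum_over_set (b : List Int) (p : Int → Bool) :
    ((((PySem.Set.ofList b).filter p).map (fun k => (b.count k : Int))).sum) = (b.countP p : Int) := by
  have hnd : ((PySem.Set.ofList b).filter p).Nodup := (PySem.Set.nodup_ofList b).filter _
  have hmem : ∀ x ∈ b.filter p, x ∈ (PySem.Set.ofList b).filter p := by
    intro x hx
    rw [List.mem_filter] at *
    exact ⟨(PySem.Set.mem_ofList b x).mpr hx.1, hx.2⟩
  have hmap : ((PySem.Set.ofList b).filter p).map (fun k => (b.count k : Int))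
      = ((PySem.Set.ofList b).filter p).map (fun k => ((b.filter p).count k : Int)) := by
    apply List.map_congr_left
    intro x hx
    rw [List.count_filter (List.mem_filter.mp hx).2]
  rw [hmap, sum_count_of_nodup _ _ hnd hmem, List.countP_eq_length_filter]

-- ===== VERDICT (by name: the statement is the Claim_ definition above) =====
theorem unfriend_number_spec : Claim_equal_unfriend_number := by
  intro a b _ _
  unfold Spec_unfriend_number unfriend_number unfriend_number_alt pvCounts
  symm
  rw [PySem.Dict.foldl_insert_getD_add_one_eq_counter, PySem.Dict.items_counter]
  set p : Int → Bool := fun j => !(pvAisDivided a j) with hp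
  calc ((PySem.Set.ofList b).map (fun k => (k, (b.count k : Int)))).foldl
        (fun total jc => if a.all (fun i => !(PySem.Int.mod i jc.1 == 0)) then total + jc.2 else total) 0
      = ((PySem.Set.ofList b).map (fun k => (k, (b.count k : Int)))).foldl
        (fun total jc => if p jc.1 then total + jc.2 else total) 0 := by
        apply PySem.List.foldl_congr_mem; intro acc x _; rw [pred_agree, hp]
    _ = (b.countP p : Int) := by
        rw [List.foldl_map, PySem.List.foldl_if_eq_foldl_filter (p := fun k => p k)
          (f := fun total k => total + (b.count k : Int))]
        rw [PySem.List.foldl_add (g := fun k => (b.count k : Int))]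
        simpa using countP_eq_sum_over_set b p
    _ = b.foldl (fun n j => if !(pvAisDivided a j) then n + 1 else n) 0 := by
        rw [PySem.List.foldl_if_add_one]; simp [hp]
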